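-- pv_equiv track=rewrite | github.com/wayland3/demo | py_test/fix_rank.py | rank1
-- ===== SOURCE A (Python) =====
-- def rank1(records):
--     result = {}  # {'playerID':{'p3':xx, 'p4':xx}}
--     for record in records:
--         player_id = record['player1']
--         mode = record['mode']
--         rank = result.get(player_id, {'p3': 0, 'p4': 0})
--         if mode in (3, 4):
--             rank['p3'] += 1
--         else:
--             rank['p4'] += 1
--         result[player_id] = rank
--     return result
-- ===== SOURCE B (Python) =====
-- def rank1(records):
--     groups = {}
--     for record in records:
--         groups.setdefault(record['player1'], []).append(record['mode'])
--     return {pid: {'p3': sum(1 for m in modes if m in (3, 4)),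
--                   'p4': sum(1 for m in modes if m not in (3, 4))}
--             for pid, modes in groups.items()}
-- ===== Notes on version B (the rewrite author's own statement) =====
-- stated objective: alternative
-- what changed: B replaces A's single loop that updates per-player counter dicts with two separate passes: a grouping pass building player -> list-of-modes, then a dict comprehension counting the two categories per group.
import Mathlib
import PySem

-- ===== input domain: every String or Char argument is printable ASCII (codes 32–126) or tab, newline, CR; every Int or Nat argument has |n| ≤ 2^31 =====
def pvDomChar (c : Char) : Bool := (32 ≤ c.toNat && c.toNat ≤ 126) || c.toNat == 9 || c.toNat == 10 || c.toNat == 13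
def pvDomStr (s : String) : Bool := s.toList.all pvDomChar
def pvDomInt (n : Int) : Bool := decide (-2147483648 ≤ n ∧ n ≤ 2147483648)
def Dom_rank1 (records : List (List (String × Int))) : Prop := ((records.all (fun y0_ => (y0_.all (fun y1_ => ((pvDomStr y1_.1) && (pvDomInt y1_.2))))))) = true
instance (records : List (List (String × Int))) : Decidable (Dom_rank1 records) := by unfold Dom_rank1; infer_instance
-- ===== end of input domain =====

-- B restructures A's single counter-updating loop into a grouping pass (player -> list of modes)
-- followed by a separate counting pass; equivalence of the return values is proved on Pre_rank1.

-- ===== PORT A =====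
-- rank['p3'] += 1 / rank['p4'] += 1 on a dict that always holds both keys: Dict.modify with default 0 is exact here.
def bumpRank (mode : Int) (rank : PySem.Dict String Int) : PySem.Dict String Int :=
  if mode = 3 ∨ mode = 4 then rank.modify "p3" 0 (· + 1) else rank.modify "p4" 0 (· + 1)

def rank1 (records : List (List (String × Int))) : List (Int × List (String × Int)) :=
  let result : PySem.Dict Int (PySem.Dict String Int) :=
    records.foldl (fun result record =>
      -- record['player1'] / record['mode']: KeyError (excluded by Pre_) is modelled by skipping
      match (PySem.Dict.mk record).get? "player1", (PySem.Dict.mk record).get? "mode" with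
      | some pid, some mode =>
          result.insert pid
            (bumpRank mode (result.getD pid (PySem.Dict.mk [("p3", 0), ("p4", 0)])))
      | _, _ => result) PySem.Dict.empty
  result.items.map (fun p => (p.1, p.2.items))

-- ===== PORT B =====
def cntP3 (ms : List Int) : Int := ((ms.filter (fun m => m == 3 || m == 4)).length : Int)
def cntP4 (ms : List Int) : Int := ((ms.filter (fun m => !(m == 3 || m == 4))).length : Int)

def rank1_alt (records : List (List (String × Int))) : List (Int × List (String × Int)) :=
  let groups : PySem.Dict Int (List Int) :=
    records.foldl (fun g record =>
      match (PySem.Dict.mk record).get? "player1" with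
      | none => g
      | some pid =>
        match (PySem.Dict.mk record).get? "mode" with
        | none => g
        | some m => g.modify pid [] (· ++ [m])   -- groups.setdefault(pid, []).append(m)
      ) PySem.Dict.empty
  groups.items.map (fun p => (p.1, [("p3", cntP3 p.2), ("p4", cntP4 p.2)]))

-- ===== PRECONDITION & SPEC =====
-- Pre_ excludes exactly the records missing key 'player1' or 'mode', on which Python A raises KeyError.
def Pre_rank1 (records : List (List (String × Int))) : Prop :=
  ∀ r ∈ records, "player1" ∈ r.map Prod.fst ∧ "mode" ∈ r.map Prod.fst
instance (records : List (List (String × Int))) : Decidable (Pre_rank1 records) := by unfold Pre_rank1; infer_instance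

def pvWitness_rank1 : (List (List (String × Int))) :=
  [[("player1", 7), ("mode", 3)], [("player1", 7), ("mode", 1)], [("player1", 2), ("mode", 4)]]

def Spec_rank1 (records : List (List (String × Int))) (out : List (Int × List (String × Int))) : Prop := out = rank1_alt records
instance (records : List (List (String × Int))) (out : List (Int × List (String × Int))) : Decidable (Spec_rank1 records out) := by unfold Spec_rank1; infer_instance

-- ===== CLAIM (what is proved, stated in full; the proofs are below) =====
def Claim_equal_rank1 : Prop := ∀ (records : List (List (String × Int))), Dom_rank1 records → Pre_rank1 records → Spec_rank1 records (rank1 records)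

-- ===== LEMMAS AND PROOFS =====

-- render a modes-list as A's counter dict
def renderPair (p : Int × List Int) : Int × PySem.Dict String Int :=
  (p.1, PySem.Dict.mk [("p3", cntP3 p.2), ("p4", cntP4 p.2)])

theorem bumpCnt_render (m : Int) (ms : List Int) :
    bumpRank m (PySem.Dict.mk [("p3", cntP3 ms), ("p4", cntP4 ms)])
      = PySem.Dict.mk [("p3", cntP3 (ms ++ [m])), ("p4", cntP4 (ms ++ [m]))] := by
  by_cases h : m = 3 ∨ m = 4
  · have hb : (m == 3 || m == 4) = true := by rcases h with h | h <;> simp [h]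
    have hb3 : (!(m == 3) && !(m == 4)) = false := by
      cases e3 : m == 3 <;> cases e4 : m == 4 <;> simp_all
    simp [bumpRank, h, hb3, PySem.Dict.modify, PySem.Dict.insert, PySem.Dict.contains,
      PySem.Dict.getD, PySem.Dict.get?, List.find?, cntP3, cntP4,
      List.filter_append, List.filter, hb]
  · rw [not_or] at h
    have h3 : (m == 3) = false := by simp [h.1]
    have h4 : (m == 4) = false := by simp [h.2]
    simp [bumpRank, h, PySem.Dict.modify, PySem.Dict.insert, PySem.Dict.contains,
      PySem.Dict.getD, PySem.Dict.get?, List.find?, cntP3, cntP4,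
      List.filter_append, List.filter, h3, h4]

theorem findMap_render (l : List (Int × List Int)) (pid : Int) :
    (l.map renderPair).find? (fun p => p.1 == pid) = (l.find? (fun p => p.1 == pid)).map renderPair := by
  induction l with
  | nil => rfl
  | cons q t ih =>
    cases hb : (q.1 == pid) <;>
      simp [List.find?_cons_of_pos, List.find?_cons_of_neg, renderPair, hb, ih]

theorem containsMap_render (l : List (Int × List Int)) (pid : Int) :
    (PySem.Dict.mk (l.map renderPair)).contains pid = (PySem.Dict.mk l).contains pid := by
  simp [PySem.Dict.contains, List.any_map, Function.comp_def, renderPair]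

theorem getDMap_render (l : List (Int × List Int)) (pid : Int) :
    (PySem.Dict.mk (l.map renderPair)).getD pid (PySem.Dict.mk [("p3", 0), ("p4", 0)])
      = PySem.Dict.mk [("p3", cntP3 ((PySem.Dict.mk l).getD pid [])),
                       ("p4", cntP4 ((PySem.Dict.mk l).getD pid []))] := by
  simp only [PySem.Dict.getD, PySem.Dict.get?, findMap_render]
  cases List.find? (fun p => p.1 == pid) l with
  | none => simp [cntP3, cntP4]
  | some q => simp [renderPair]

theorem insertMap_render (l : List (Int × List Int)) (pid : Int) (ms : List Int) :
    (PySem.Dict.mk (l.map renderPair)).insert pid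
        (PySem.Dict.mk [("p3", cntP3 ms), ("p4", cntP4 ms)])
      = PySem.Dict.mk (((PySem.Dict.mk l).insert pid ms).items.map renderPair) := by
  simp only [PySem.Dict.insert, containsMap_render]
  split_ifs with h
  · simp only [List.map_map]
    congr 1
    congr 1
    funext q
    by_cases hq : q.1 = pid <;> simp [renderPair, hq]
  · simp [renderPair]

theorem stepRank (l : List (Int × List Int)) (pid m : Int) :
    (PySem.Dict.mk (l.map renderPair)).insert pid
        (bumpRank m ((PySem.Dict.mk (l.map renderPair)).getD pid (PySem.Dict.mk [("p3", 0), ("p4", 0)])))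
      = PySem.Dict.mk ((((PySem.Dict.mk l).modify pid [] (· ++ [m]))).items.map renderPair) := by
  rw [getDMap_render, bumpCnt_render]
  simp only [PySem.Dict.modify]
  exact insertMap_render l pid ((PySem.Dict.mk l).getD pid [] ++ [m])

theorem loopRank (records : List (List (String × Int))) (l : List (Int × List Int)) :
    records.foldl (fun result record =>
      match (PySem.Dict.mk record).get? "player1", (PySem.Dict.mk record).get? "mode" with
      | some pid, some mode =>
          result.insert pid
            (bumpRank mode (result.getD pid (PySem.Dict.mk [("p3", 0), ("p4", 0)])))
      | _, _ => result) (PySem.Dict.mk (l.map renderPair))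
    = PySem.Dict.mk ((records.foldl (fun g record =>
      match (PySem.Dict.mk record).get? "player1" with
      | none => g
      | some pid =>
        match (PySem.Dict.mk record).get? "mode" with
        | none => g
        | some m => g.modify pid [] (· ++ [m])
      ) (PySem.Dict.mk l)).items.map renderPair) := by
  induction records generalizing l with
  | nil => rfl
  | cons r t ih =>
    simp only [List.foldl_cons]
    cases h1 : (PySem.Dict.mk r : PySem.Dict String Int).get? "player1" with
    | none => exact ih l
    | some pid =>
      cases h2 : (PySem.Dict.mk r : PySem.Dict String Int).get? "mode" with
      | none => exact ih l
      | some m =>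
        dsimp only
        rw [stepRank l pid m]
        exact ih (((PySem.Dict.mk l).modify pid [] (· ++ [m])).items)

-- ===== VERDICT (by name: the statement is the Claim_ definition above) =====
theorem rank1_spec : Claim_equal_rank1 := by
  intro records _ _
  unfold Spec_rank1 rank1 rank1_alt
  have h := loopRank records []
  simp only [List.map_nil] at h
  rw [show (PySem.Dict.empty : PySem.Dict Int (PySem.Dict String Int)) = PySem.Dict.mk [] from rfl,
      show (PySem.Dict.empty : PySem.Dict Int (List Int)) = PySem.Dict.mk [] from rfl, h]
  simp [renderPair]
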